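-- pv_equiv track=rewrite | github.com/ZivFerdinand/CompetitiveProgramming | Python/gunungLembah.py | hitung_gunung
-- ===== SOURCE A (Python) =====
-- def hitung_gunung(steps, path):
--     altitude = 0
--     gunung = 0
--     for i in range(steps):
--         if path[i] == 'N':
--             altitude += 1
--         else:
--             altitude -= 1
--
--         if(altitude == 1) & (path[i] != 'T'):
--             gunung += 1
--
--     return gunung
-- ===== SOURCE B (Python) =====
-- def hitung_gunung(steps, path):
--     # Altitude can equal 1 only after an odd number of moves (even index i = 2*k),
--     # where it equals 1 iff the 'N'-count of path[:2*k+1] is k+1.  So walk the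
--     # prefix two steps at a time with a running 'N' counter and test only the
--     # first step of each pair; odd positions are never tested.
--     peaks = 0
--     n_seen = 0
--     k = 0
--     while 2 * k < steps:
--         a = path[2 * k]
--         if a == 'N':
--             n_seen += 1
--         if n_seen == k + 1 and a != 'T':
--             peaks += 1
--         if 2 * k + 1 < steps:
--             if path[2 * k + 1] == 'N':
--                 n_seen += 1
--         k += 1
--     return peaks
-- ===== Notes on version B (the rewrite author's own statement) =====
-- stated objective: alternative
-- what changed: Replaces altitude tracking by a parity argument: the altitude can be 1 only after an odd number of moves (even index i=2k, exactly when the 'N'-count of the first 2k+1 steps is k+1), so B walks the prefix in strides of two with a running 'N' counter and tests only the first step of each pair.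
import Mathlib
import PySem

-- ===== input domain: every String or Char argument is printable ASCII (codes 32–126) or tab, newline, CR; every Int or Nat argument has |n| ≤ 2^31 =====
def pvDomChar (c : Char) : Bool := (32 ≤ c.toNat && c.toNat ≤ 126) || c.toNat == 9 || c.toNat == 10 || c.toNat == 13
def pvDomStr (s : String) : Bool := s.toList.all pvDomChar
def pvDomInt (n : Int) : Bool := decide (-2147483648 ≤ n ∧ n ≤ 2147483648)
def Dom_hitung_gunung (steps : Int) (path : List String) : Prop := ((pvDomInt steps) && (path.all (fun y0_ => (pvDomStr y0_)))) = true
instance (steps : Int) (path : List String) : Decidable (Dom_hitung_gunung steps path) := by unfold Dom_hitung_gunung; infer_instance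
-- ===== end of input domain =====

-- B replaces A's altitude-tracking loop by a parity argument: the altitude can be 1 only
-- after an odd number of moves (even index i = 2k), exactly when the 'N'-count of the
-- first 2k+1 steps is k+1, so B walks the prefix two steps at a time with a running
-- 'N' counter and tests only the first step of each pair; objective: alternative.

-- ===== PORT A =====
def hitung_gunung (steps : Int) (path : List String) : Int :=
  ((PySem.List.pyRange 0 steps 1).foldl
    (fun (st : Int × Int) i =>
      let altitude := if PySem.List.pyGetD path i "" = "N" then st.1 + 1 else st.1 - 1
      (altitude, if altitude = 1 ∧ PySem.List.pyGetD path i "" ≠ "T" then st.2 + 1 else st.2))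
    (0, 0)).2

-- ===== PORT B =====
-- the `while 2 * k < steps` loop of Source B, state (peaks, n_seen, k)
def pvGo (steps : Int) (path : List String) (peaks n_seen k : Int) : Int :=
  if 2 * k < steps then
    let a := PySem.List.pyGetD path (2 * k) ""
    let n1 := if a = "N" then n_seen + 1 else n_seen
    let p1 := if n1 = k + 1 ∧ a ≠ "T" then peaks + 1 else peaks
    let n2 := if 2 * k + 1 < steps then
                (if PySem.List.pyGetD path (2 * k + 1) "" = "N" then n1 + 1 else n1)
              else n1
    pvGo steps path p1 n2 (k + 1)
  else peaks
termination_by (steps - 2 * k).toNat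
decreasing_by omega

def hitung_gunung_alt (steps : Int) (path : List String) : Int :=
  pvGo steps path 0 0 0

-- ===== PRECONDITION & SPEC =====
-- A raises IndexError when steps > len(path); exactly those inputs are excluded.
def Pre_hitung_gunung (steps : Int) (path : List String) : Prop := steps ≤ (path.length : Int)
instance (steps : Int) (path : List String) : Decidable (Pre_hitung_gunung steps path) := by
  unfold Pre_hitung_gunung; infer_instance

def pvWitness_hitung_gunung : Int × List String := (3, ["N", "T", "N"])

def Spec_hitung_gunung (steps : Int) (path : List String) (out : Int) : Prop := out = hitung_gunung_alt steps path
instance (steps : Int) (path : List String) (out : Int) : Decidable (Spec_hitung_gunung steps path out) := by unfold Spec_hitung_gunung; infer_instance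

-- ===== CLAIM (what is proved, stated in full; the proofs are below) =====
def Claim_equal_hitung_gunung : Prop := ∀ (steps : Int) (path : List String), Dom_hitung_gunung steps path → Pre_hitung_gunung steps path → Spec_hitung_gunung steps path (hitung_gunung steps path)

-- ===== LEMMAS AND PROOFS =====

-- proof-side reformulation of B's pair walk, consuming the prefix list directly
def pairCount : List String → Int → Int → Int → Int
  | [], _, _, peaks => peaks
  | a :: rest, n, k, peaks =>
    let n1 := if a = "N" then n + 1 else n
    let p1 := if n1 = k + 1 ∧ a ≠ "T" then peaks + 1 else peaks
    match rest with
    | [] => p1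
    | b :: rest' => pairCount rest' (if b = "N" then n1 + 1 else n1) (k + 1) p1

-- A's fold over the prefix, started at the even altitude 2n-2k, equals the pair walk:
-- at odd indices the altitude is even, so A's test can fire only at the first of each pair.
theorem foldA_pairCount : ∀ (m : Nat) (t : List String), t.length ≤ m → ∀ (n k g : Int),
    (t.foldl
      (fun (st : Int × Int) c =>
        let altitude := if c = "N" then st.1 + 1 else st.1 - 1
        (altitude, if altitude = 1 ∧ c ≠ "T" then st.2 + 1 else st.2))
      (2 * n - 2 * k, g)).2 = pairCount t n k g := by
  intro m
  induction m with
  | zero =>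
    intro t ht n k g
    have : t = [] := List.eq_nil_of_length_eq_zero (by omega)
    subst this; simp [pairCount]
  | succ m ih =>
    intro t ht n k g
    match t with
    | [] => simp [pairCount]
    | [a] =>
      by_cases ha : a = "N" <;> by_cases hT : a = "T" <;>
        simp [pairCount, ha, hT] <;> split_ifs <;> first | rfl | omega
    | a :: b :: rest' =>
      have hr : rest'.length ≤ m := by simp at ht; omega
      have iha := fun n' g' => ih rest' hr n' (k + 1) g'
      simp only [List.foldl_cons, pairCount]
      by_cases ha : a = "N" <;> by_cases hT : a = "T" <;> by_cases hb : b = "N" <;>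
        simp [ha, hT, hb]
      all_goals try (rw [ha] at hT; exact absurd hT (by decide))
      all_goals split_ifs <;>
        first
        | (exfalso; omega)
        | (convert iha _ _ using 4 <;> ring)

-- B's index-based pair walk equals the pair walk over the taken prefix.
theorem pvGo_pairCount : ∀ (m : Nat) (steps : Int) (path : List String) (k n peaks : Int),
    0 ≤ k → steps ≤ (path.length : Int) → (steps - 2 * k).toNat ≤ m →
    pvGo steps path peaks n k
      = pairCount ((path.take steps.toNat).drop (2 * k).toNat) n k peaks := by
  intro m
  induction m with
  | zero =>
    intro steps path k n peaks hk hlen hm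
    rw [pvGo, if_neg (by omega), List.drop_eq_nil_of_le (by simp; omega), pairCount]
  | succ m ih =>
    intro steps path k n peaks hk hlen hm
    by_cases hlt : 2 * k < steps
    · have hlen2 : (path.take steps.toNat).length = steps.toNat := by simp; omega
      have hik : (2 * k).toNat < (path.take steps.toNat).length := by omega
      rw [List.drop_eq_getElem_cons hik]
      have hga : PySem.List.pyGetD path (2 * k) ""
          = (path.take steps.toNat)[(2 * k).toNat] := by
        rw [PySem.List.pyGetD_eq_getElem path "" (by omega) (by omega)]
        simp [List.getElem_take]
      by_cases h2 : 2 * k + 1 < steps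
      · have hik2 : (2 * k).toNat + 1 < (path.take steps.toNat).length := by omega
        rw [List.drop_eq_getElem_cons hik2, pairCount]
        have hgb : PySem.List.pyGetD path (2 * k + 1) ""
            = (path.take steps.toNat)[(2 * k).toNat + 1] := by
          rw [PySem.List.pyGetD_eq_getElem path "" (by omega) (by omega)]
          simp [List.getElem_take]
          congr 1
          omega
        rw [pvGo, if_pos hlt]
        simp only [if_pos h2, hga, hgb]
        rw [show (2 * k).toNat + 1 + 1 = (2 * (k + 1)).toNat from by omega,
          ih steps path (k+1) _ _ (by omega) hlen (by omega)]
      · -- steps = 2*k + 1 : single trailing element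
        have : (path.take steps.toNat).drop ((2 * k).toNat + 1) = [] :=
          List.drop_eq_nil_of_le (by omega)
        rw [this, pairCount]
        rw [pvGo, if_pos hlt]
        simp only [if_neg h2, hga]
        rw [pvGo, if_neg (by omega)]
    · rw [pvGo, if_neg hlt, List.drop_eq_nil_of_le (by simp; omega), pairCount]

-- ===== VERDICT =====
theorem hitung_gunung_spec : Claim_equal_hitung_gunung := by
  intro steps path _ hpre
  unfold Pre_hitung_gunung at hpre
  unfold Spec_hitung_gunung hitung_gunung hitung_gunung_alt
  rw [pvGo_pairCount (steps - 0).toNat steps path 0 0 0 le_rfl hpre (by omega)]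
  by_cases hs : steps ≤ 0
  · rw [PySem.List.pyRange_one_eq_nil hs]
    rw [List.drop_eq_nil_of_le (by simp; omega), pairCount]
    simp
  · have h0 : (0 : Int) ≤ steps := by omega
    have hn : steps.toNat ≤ path.length := by omega
    set t := path.take steps.toNat with ht
    have hlen : t.length = steps.toNat := by simp [ht, hn]
    have hsteps : steps = (t.length : Int) := by rw [hlen]; omega
    rw [hsteps]
    rw [PySem.List.foldl_congr_mem
      (g := fun (st : Int × Int) i =>
        let altitude := if PySem.List.pyGetD t i "" = "N" then st.1 + 1 else st.1 - 1
        (altitude, if altitude = 1 ∧ PySem.List.pyGetD t i "" ≠ "T" then st.2 + 1 else st.2))]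
    · rw [PySem.List.foldl_pyRange_zero_pyGetD' t ""
        (fun (st : Int × Int) c =>
          let altitude := if c = "N" then st.1 + 1 else st.1 - 1
          (altitude, if altitude = 1 ∧ c ≠ "T" then st.2 + 1 else st.2)) (0, 0)]
      have hcore := foldA_pairCount t.length t le_rfl 0 0 0
      simp only [show (2 : Int) * 0 - 2 * 0 = 0 from by ring] at hcore
      rw [hcore]
      simp
    · intro acc x hx
      rw [PySem.List.mem_pyRange_one] at hx
      have hget : PySem.List.pyGetD path x "" = PySem.List.pyGetD t x "" := by
        rw [PySem.List.pyGetD_eq_getElem path "" hx.1 (by omega),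
            PySem.List.pyGetD_eq_getElem t "" hx.1 (by omega)]
        simp [ht, List.getElem_take]
      rw [hget]
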